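-- pv_equiv track=rewrite | github.com/riga/aoc2024 | aoc2024/day23.py | sorted_combinations
-- ===== SOURCE A (Python) =====
-- from typing import Generator
--
-- def sorted_combinations(values: list[str] | set[str], n: int) -> Generator[tuple[str, ...], None, None]:
--     def combs(values: list[str], n: int):
--         if n == 1:
--             # yield innermost values as 1-tuples
--             for va in values:
--                 yield (va,)
--         else:
--             # iterate over leading values, skipping the last n - 1, then yield sub combinations
--             for i in range(len(values) - (n - 1)):
--                 for vals in combs(values[i + 1:], n - 1):
--                     yield (values[i],) + vals
--
--     # perform input checks and sorting once, start recursion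
--     assert 0 < n <= len(values)
--     yield from combs(sorted(values), n)
-- ===== SOURCE B (Python) =====
-- def sorted_combinations(values, n):
--     assert 0 < n <= len(values)
--
--     def combs(pool, n):
--         if n == 0:
--             yield ()
--         elif pool:
--             head, rest = pool[0], pool[1:]
--             for tail in combs(rest, n - 1):
--                 yield (head,) + tail
--             yield from combs(rest, n)
--
--     yield from combs(sorted(values), n)
-- ===== Notes on version B (the rewrite author's own statement) =====
-- stated objective: alternative
-- what changed: Replaces A's recursion that loops over leading indices and recurses on list slices values[i+1:] with the classic with/without-head binary recursion (combinations containing the head, then combinations of the tail), producing the same lexicographic sequence with no index loop and no slicing.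
import Mathlib
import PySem

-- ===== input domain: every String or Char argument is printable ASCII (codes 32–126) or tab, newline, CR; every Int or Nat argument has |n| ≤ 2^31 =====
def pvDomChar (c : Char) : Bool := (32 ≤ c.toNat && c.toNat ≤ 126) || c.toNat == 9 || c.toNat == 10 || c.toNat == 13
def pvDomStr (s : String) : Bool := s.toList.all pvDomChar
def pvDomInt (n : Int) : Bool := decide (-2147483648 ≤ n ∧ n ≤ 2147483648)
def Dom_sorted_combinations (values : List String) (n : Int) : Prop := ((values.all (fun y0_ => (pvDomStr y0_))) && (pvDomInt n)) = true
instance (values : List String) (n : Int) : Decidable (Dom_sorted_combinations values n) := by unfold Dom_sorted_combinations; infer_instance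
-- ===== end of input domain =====

-- B replaces A's index-loop-over-leading-positions with slices by the classic
-- with/without-head recursion, same lexicographic output (objective: alternative).

-- ===== PORT A =====
-- inner generator combs(values, n), consumed into a list; fuel only makes the
-- Lean recursion total (it never runs out for the calls A actually makes:
-- a fresh call uses fuel = values.length + 1 and every recursive call strictly
-- shrinks values while consuming one unit of fuel)
def pvCombsA : Nat → List String → Int → List (List String)
  | 0, _, _ => []
  | fuel + 1, values, n =>
    if n == 1 then
      values.map (fun va => [va])
    else
      (PySem.List.pyRange 0 ((values.length : Int) - (n - 1)) 1).flatMap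
        (fun i =>
          (pvCombsA fuel (PySem.List.slice values (some (i + 1)) none) (n - 1)).map
            -- values[i]: always in range here (0 ≤ i < len - (n-1) ≤ len), so pyGetD is exact
            (fun vals => PySem.List.pyGetD values i "" :: vals))

def sorted_combinations (values : List String) (n : Int) : List (List String) :=
  pvCombsA (values.length + 1) (PySem.List.sorted values (fun x => x) false) n

-- ===== PORT B =====
def pvCombsB : List String → Int → List (List String)
  | pool, n =>
    if n == 0 then [[]]
    else
      match pool with
      | [] => []
      | head :: rest =>
        (pvCombsB rest (n - 1)).map (fun tail => head :: tail) ++ pvCombsB rest n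
  termination_by pool => pool.length

def sorted_combinations_alt (values : List String) (n : Int) : List (List String) :=
  pvCombsB (PySem.List.sorted values (fun x => x) false) n

-- ===== PRECONDITION & SPEC =====
-- Pre_ excludes exactly the inputs where A's `assert 0 < n <= len(values)` raises AssertionError
def Pre_sorted_combinations (values : List String) (n : Int) : Prop :=
  0 < n ∧ n ≤ (values.length : Int)
instance (values : List String) (n : Int) : Decidable (Pre_sorted_combinations values n) := by
  unfold Pre_sorted_combinations; infer_instance
def pvWitness_sorted_combinations : List String × Int := (["b", "a", "c"], 2)

def Spec_sorted_combinations (values : List String) (n : Int) (out : List (List String)) : Prop := out = sorted_combinations_alt values n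
instance (values : List String) (n : Int) (out : List (List String)) : Decidable (Spec_sorted_combinations values n out) := by unfold Spec_sorted_combinations; infer_instance

-- ===== CLAIM (what is proved, stated in full; the proofs are below) =====
def Claim_equal_sorted_combinations : Prop := ∀ (values : List String) (n : Int), Dom_sorted_combinations values n → Pre_sorted_combinations values n → Spec_sorted_combinations values n (sorted_combinations values n)

-- ===== LEMMAS AND PROOFS =====

lemma pvCombsB_zero (pool : List String) : pvCombsB pool 0 = [[]] := by
  rw [pvCombsB.eq_def]; simp

-- B on n = 1 yields exactly the 1-element combinations
lemma pvCombsB_one (pool : List String) : pvCombsB pool 1 = pool.map (fun v => [v]) := by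
  induction pool with
  | nil => rw [pvCombsB.eq_def]; simp
  | cons h t ih => rw [pvCombsB.eq_def]; simp [ih, pvCombsB_zero]

-- B yields nothing when asked for more elements than the pool has
lemma pvCombsB_nil_of_lt (pool : List String) : ∀ (n : Int), (pool.length : Int) < n → pvCombsB pool n = [] := by
  induction pool with
  | nil =>
    intro n hn
    simp only [List.length_nil, Nat.cast_zero] at hn
    have hne : ¬ n = 0 := by omega
    rw [pvCombsB.eq_def]; simp [hne]
  | cons h t ih =>
    intro n hn
    simp only [List.length_cons] at hn
    have hne : ¬ n = 0 := by push_cast at hn; omega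
    have h2 : (t.length : Int) < n - 1 := by push_cast at hn ⊢; omega
    have h3 : (t.length : Int) < n := by push_cast at hn ⊢; omega
    rw [pvCombsB.eq_def]; simp [hne, ih _ h2, ih _ h3]

-- A's leading-index loop (with the inner recursion already rewritten to B) IS B's step
lemma stepB (n : Int) (h2 : 2 ≤ n) (pool : List String) :
    (List.range ((pool.length : Int) - (n - 1)).toNat).flatMap
      (fun j => (pvCombsB (pool.drop (j + 1)) (n - 1)).map (fun vals => pool.getD j "" :: vals))
    = pvCombsB pool n := by
  induction pool with
  | nil =>
    have h0 : ((([] : List String).length : Int) - (n - 1)).toNat = 0 := by simp; omega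
    rw [h0]
    have hne : ¬ n = 0 := by omega
    rw [pvCombsB.eq_def]; simp [hne]
  | cons h t ih =>
    have hne : ¬ n = 0 := by omega
    by_cases hk : ((t.length + 1 : Int) - (n - 1)) ≤ 0
    · have h0 : (((h :: t).length : Int) - (n - 1)).toNat = 0 := by
        simp only [List.length_cons]; push_cast; omega
      have hlt1 : (t.length : Int) < n - 1 := by omega
      have hlt2 : (t.length : Int) < n := by omega
      rw [h0, pvCombsB.eq_def]
      simp [hne, pvCombsB_nil_of_lt t _ hlt1, pvCombsB_nil_of_lt t _ hlt2]
    · rw [not_le] at hk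
      have hK : (((h :: t).length : Int) - (n - 1)).toNat
          = ((t.length : Int) - (n - 1)).toNat + 1 := by
        simp only [List.length_cons]; push_cast; omega
      rw [hK, List.range_succ_eq_map, List.flatMap_cons, List.flatMap_map]
      rw [show pvCombsB (h :: t) n
            = (pvCombsB t (n - 1)).map (fun tail => h :: tail) ++ pvCombsB t n from by
          rw [pvCombsB.eq_def]; simp [hne]]
      refine congrArg₂ (· ++ ·) ?_ ?_
      · simp
      · rw [← ih]
        apply List.flatMap_congr
        intro j hj
        simp [Nat.succ_eq_add_one, List.drop_succ_cons]

-- main bridge: with enough fuel, A's recursion computes B's recursion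
lemma pvCombsA_eq_pvCombsB : ∀ (fuel : Nat) (pool : List String) (n : Int),
    1 ≤ n → pool.length < fuel → pvCombsA fuel pool n = pvCombsB pool n := by
  intro fuel
  induction fuel with
  | zero => intro pool n _ hlen; omega
  | succ fuel ih =>
    intro pool n hn hlen
    by_cases h1 : n = 1
    · subst h1
      simp [pvCombsA, pvCombsB_one]
    · have h2 : 2 ≤ n := by omega
      have hne : ¬ (n == 1) = true := by simp [h1]
      rw [pvCombsA, if_neg hne]
      rw [PySem.List.pyRange_one, Int.sub_zero, List.flatMap_map]
      rw [← stepB n h2 pool]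
      apply List.flatMap_congr
      intro j hj
      have hjlt : (j : Int) < (pool.length : Int) - (n - 1) := by
        have := List.mem_range.mp hj
        omega
      have hslice : PySem.List.slice pool (some ((0 : Int) + (j : Int) + 1)) none
          = pool.drop (j + 1) := by
        have h' : ((0 : Int) + (j : Int) + 1) = ((j + 1 : Nat) : Int) := by push_cast; ring
        rw [h', PySem.List.slice_from_natCast]
      have hget : PySem.List.pyGetD pool ((0 : Int) + (j : Int)) "" = pool.getD j "" := by
        have h' : ((0 : Int) + (j : Int)) = ((j : Nat) : Int) := by ring
        rw [h', PySem.List.pyGetD_natCast]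
      simp only [hslice, hget]
      congr 1
      apply ih
      · omega
      · have hpos : 1 ≤ pool.length := by omega
        simp only [List.length_drop]
        omega

-- ===== VERDICT (by name: the statement is the Claim_ definition above) =====
theorem sorted_combinations_spec : Claim_equal_sorted_combinations := by
  intro values n _ hpre
  unfold Spec_sorted_combinations sorted_combinations sorted_combinations_alt
  apply pvCombsA_eq_pvCombsB
  · exact hpre.1
  · rw [PySem.List.length_sorted]; omega
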